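-- pv_equiv track=rewrite | github.com/pypi-data/pypi-mirror-137 | packages/QPE/QPE-0.0.1.11.tar.gz/QPE-0.0.1.11/src/QPE/HelpFunctions.py | get_sub_bitstring_counter
-- ===== SOURCE A (Python) =====
-- def get_sub_bitstring_counter(counts, n_splits):
--     if not isinstance(counts, dict):
--         try:
--             counts = dict(counts)
--         except:
--             raise TypeError("Input counts is not dict or convertable to dict")
--
--     n_bits = len(list(counts.keys())[0])
--     if n_bits%n_splits != 0:
--         raise ValueError("Length of bitstring and n_splits not compatible")
--     sub_bitstring_len = n_bits//n_splits
--     sub_bitstring_dicts = []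
--     for n in range(n_splits):
--         d = {}
--         b_start = n*sub_bitstring_len
--         b_end = (n+1)*sub_bitstring_len
--         for full_bitstring in counts:
--             temp_count = counts[full_bitstring]
--             sub_bitstring = full_bitstring[b_start:b_end]
--             if sub_bitstring in d.keys():
--                 d[sub_bitstring] += temp_count
--             else:
--                 d[sub_bitstring] = temp_count
--         sub_bitstring_dicts.append(d)
--
--     return sub_bitstring_dicts
-- ===== SOURCE B (Python) =====
-- def get_sub_bitstring_counter(counts, n_splits):
--     if not isinstance(counts, dict):
--         try:
--             counts = dict(counts)
--         except:
--             raise TypeError("Input counts is not dict or convertable to dict")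
--
--     n_bits = len(list(counts.keys())[0])
--     if n_bits % n_splits != 0:
--         raise ValueError("Length of bitstring and n_splits not compatible")
--     L = n_bits // n_splits
--
--     items = list(counts.items())
--     result = []
--     for n in range(n_splits):
--         # group-by: materialize the sliced pairs, dedup the slice keys in
--         # first-appearance order, then sum the matching counts per key
--         pairs = [(k[n * L:(n + 1) * L], c) for k, c in items]
--         keys = []
--         for s, _ in pairs:
--             if s not in keys:
--                 keys.append(s)
--         result.append({s: sum(c for t, c in pairs if t == s) for s in keys})
--     return result
-- ===== Notes on version B (the rewrite author's own statement) =====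
-- stated objective: alternative
-- what changed: The incremental dict accumulation is replaced by a staged group-by: per split B materializes the list of (slice, count) pairs, deduplicates the slice keys in first-appearance order, and builds the dict in one comprehension whose value is a filtered sum over the pairs, so no running dict is ever updated.
import Mathlib
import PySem

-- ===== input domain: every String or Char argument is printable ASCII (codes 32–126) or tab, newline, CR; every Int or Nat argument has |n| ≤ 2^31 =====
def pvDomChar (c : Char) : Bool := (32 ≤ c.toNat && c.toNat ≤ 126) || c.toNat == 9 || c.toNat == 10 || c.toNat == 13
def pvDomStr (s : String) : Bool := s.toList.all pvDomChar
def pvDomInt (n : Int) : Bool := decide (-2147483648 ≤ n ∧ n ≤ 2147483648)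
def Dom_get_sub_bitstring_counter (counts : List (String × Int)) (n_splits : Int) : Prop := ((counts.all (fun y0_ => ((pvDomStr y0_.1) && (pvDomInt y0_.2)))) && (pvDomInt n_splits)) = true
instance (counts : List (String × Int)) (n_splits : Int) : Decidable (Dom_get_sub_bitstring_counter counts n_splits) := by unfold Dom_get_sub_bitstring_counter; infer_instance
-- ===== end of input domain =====

-- B replaces A's incremental dict accumulation by a staged group-by per split: slice pairs are materialized,
-- slice keys deduplicated in first-appearance order, and each value is a filtered sum; same results, alternative structure.


-- ===== PORT A =====
-- loop body of A's inner 'for full_bitstring in counts' loop (named so the proofs can refer to it)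
def pvStepA (L n : Int) (d : PySem.Dict String Int) (k : String) (c : Int) : PySem.Dict String Int :=
  let sub := PySem.Str.slice k (some (n * L)) (some ((n + 1) * L))
  if d.contains sub then d.modify sub 0 (· + c) else d.insert sub c

def get_sub_bitstring_counter (counts : List (String × Int)) (n_splits : Int) : List (List (String × Int)) :=
  let cd : PySem.Dict String Int := PySem.Dict.ofList counts   -- counts = dict(counts)
  match PySem.List.pyGet? cd.keys 0 with                       -- list(counts.keys())[0]: none = IndexError, excluded by Pre_
  | none => []
  | some k0 =>
    let n_bits : Int := (PySem.Str.len k0 : Int)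
    if PySem.Int.mod n_bits n_splits ≠ 0 then []               -- ValueError (and n_splits = 0), excluded by Pre_
    else
      let L := PySem.Int.floordiv n_bits n_splits
      (PySem.List.pyRange 0 n_splits 1).foldl (fun acc n =>
        let d := cd.keys.foldl (fun d k => pvStepA L n d k (cd.getD k 0)) PySem.Dict.empty
        acc ++ [d.items]) []

-- ===== PORT B =====
-- the per-split sliced pair list [(k[n*L:(n+1)*L], c) for k, c in items]
def pvSlicePairs (L n : Int) (items : List (String × Int)) : List (String × Int) :=
  items.map (fun p => (PySem.Str.slice p.1 (some (n * L)) (some ((n + 1) * L)), p.2))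

-- B's dedup loop: keys = []; for s, _ in pairs: if s not in keys: keys.append(s)
def pvFirstKeys (pairs : List (String × Int)) : List String :=
  pairs.foldl (fun ks p => if p.1 ∈ ks then ks else ks ++ [p.1]) []

-- sum(c for t, c in pairs if t == s)
def pvSumFor (pairs : List (String × Int)) (s : String) : Int :=
  ((pairs.filter (fun q => q.1 == s)).map (·.2)).sum

def get_sub_bitstring_counter_alt (counts : List (String × Int)) (n_splits : Int) : List (List (String × Int)) :=
  let cd : PySem.Dict String Int := PySem.Dict.ofList counts
  match PySem.List.pyGet? cd.keys 0 with
  | none => []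
  | some k0 =>
    let n_bits : Int := (PySem.Str.len k0 : Int)
    if PySem.Int.mod n_bits n_splits ≠ 0 then []
    else
      let L := PySem.Int.floordiv n_bits n_splits
      let items := cd.items
      (PySem.List.pyRange 0 n_splits 1).foldl (fun acc n =>
        let pairs := pvSlicePairs L n items
        let keys := pvFirstKeys pairs
        acc ++ [keys.map (fun s => (s, pvSumFor pairs s))]) []

-- ===== PRECONDITION & SPEC =====
-- Pre_ excludes exactly the raising inputs: empty counts (IndexError), n_splits = 0 (ZeroDivisionError),
-- and a first-key length not divisible by n_splits (ValueError).
def Pre_get_sub_bitstring_counter (counts : List (String × Int)) (n_splits : Int) : Prop :=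
  counts ≠ [] ∧ n_splits ≠ 0 ∧ PySem.Int.mod (PySem.Str.len (counts.headD ("", 0)).1 : Int) n_splits = 0
instance (counts : List (String × Int)) (n_splits : Int) : Decidable (Pre_get_sub_bitstring_counter counts n_splits) := by unfold Pre_get_sub_bitstring_counter; infer_instance
def pvWitness_get_sub_bitstring_counter : (List (String × Int)) × Int := ([("0110", 3), ("1010", 1)], 2)

def Spec_get_sub_bitstring_counter (counts : List (String × Int)) (n_splits : Int) (out : List (List (String × Int))) : Prop := out = get_sub_bitstring_counter_alt counts n_splits
instance (counts : List (String × Int)) (n_splits : Int) (out : List (List (String × Int))) : Decidable (Spec_get_sub_bitstring_counter counts n_splits out) := by unfold Spec_get_sub_bitstring_counter; infer_instance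

-- ===== CLAIM =====
def Claim_equal_get_sub_bitstring_counter : Prop := ∀ (counts : List (String × Int)) (n_splits : Int), Dom_get_sub_bitstring_counter counts n_splits → Pre_get_sub_bitstring_counter counts n_splits → Spec_get_sub_bitstring_counter counts n_splits (get_sub_bitstring_counter counts n_splits)

-- ===== LEMMAS AND PROOFS =====

-- A's branch on containment equals an unconditional insert of getD + c.
lemma stepA_eq_insert (L n : Int) (d : PySem.Dict String Int) (k : String) (c : Int) :
    pvStepA L n d k c =
      d.insert (PySem.Str.slice k (some (n * L)) (some ((n + 1) * L)))
        (d.getD (PySem.Str.slice k (some (n * L)) (some ((n + 1) * L))) 0 + c) := by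
  unfold pvStepA
  by_cases h : d.contains (PySem.Str.slice k (some (n * L)) (some ((n + 1) * L))) = true
  · simp only [h, if_true, PySem.Dict.modify]
  · rw [if_neg h, PySem.Dict.getD_of_not_contains d 0 (by simpa using h)]
    norm_num

-- A's scan over cd.keys with lookups equals the scan over cd.items (keys are nodup).
lemma keys_fold_eq_items_fold (cd : PySem.Dict String Int)
    (F : PySem.Dict String Int → String → Int → PySem.Dict String Int)
    (init : PySem.Dict String Int) (h : cd.keys.Nodup) :
    cd.keys.foldl (fun d k => F d k (cd.getD k 0)) init = cd.items.foldl (fun d p => F d p.1 p.2) init := by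
  have hk : cd.keys = cd.items.map (fun p => p.1) := rfl
  rw [hk, List.foldl_map]
  refine PySem.List.foldl_congr_mem _ _ _ _ (fun acc p hp => ?_)
  rw [PySem.Dict.getD_of_mem_items cd (k := p.1) (v := p.2) (by simpa using hp) h 0]

-- the dedup loop IS set(...) of the slice keys in first-appearance order
lemma firstKeys_eq_ofList (pairs : List (String × Int)) :
    pvFirstKeys pairs = PySem.Set.ofList (pairs.map (·.1)) := by
  unfold pvFirstKeys
  rw [PySem.Set.ofList_eq_foldl, List.foldl_map]
  simp only [PySem.Set.add_eq_ite]

-- getD of the accumulation fold is the filtered sum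
lemma getD_fold_sum (pairs : List (String × Int)) (d : PySem.Dict String Int) (s : String) :
    (pairs.foldl (fun d p => d.insert p.1 (d.getD p.1 0 + p.2)) d).getD s 0
      = d.getD s 0 + pvSumFor pairs s := by
  induction pairs generalizing d with
  | nil => simp [pvSumFor]
  | cons p ps ih =>
    rw [List.foldl_cons, ih]
    unfold pvSumFor
    by_cases h : p.1 = s
    · simp [h]
      ring
    · simp [h, PySem.Dict.getD_insert, Ne.symm h]

-- the accumulated dict's items are exactly B's dedup-then-sum list
lemma items_fold_eq_groupby (pairs : List (String × Int)) :
    (pairs.foldl (fun d p => d.insert p.1 (d.getD p.1 0 + p.2)) (PySem.Dict.empty : PySem.Dict String Int)).items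
      = (pvFirstKeys pairs).map (fun s => (s, pvSumFor pairs s)) := by
  set D := pairs.foldl (fun d p => d.insert p.1 (d.getD p.1 0 + p.2)) (PySem.Dict.empty : PySem.Dict String Int) with hD
  have hnd : D.keys.Nodup := by
    rw [hD]
    exact PySem.Dict.nodup_keys_foldl_insert_key pairs (fun p => p.1) _ _ PySem.Dict.nodup_keys_empty
  have hkeys : D.keys = pvFirstKeys pairs := by
    rw [hD, PySem.Dict.keys_foldl_insert_key, PySem.Dict.keys_empty, PySem.Set.update_nil_left,
      firstKeys_eq_ofList]
  rw [PySem.Dict.items_eq_map_keys D hnd 0, hkeys]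
  refine List.map_congr_left (fun s _ => ?_)
  rw [hD, getD_fold_sum, PySem.Dict.getD_empty]
  simp

-- ===== VERDICT =====
theorem get_sub_bitstring_counter_spec : Claim_equal_get_sub_bitstring_counter := by
  intro counts n_splits _ _
  unfold Spec_get_sub_bitstring_counter get_sub_bitstring_counter get_sub_bitstring_counter_alt
  simp only []
  cases hk : PySem.List.pyGet? (PySem.Dict.ofList counts).keys 0 with
  | none => rfl
  | some k0 =>
    dsimp only
    by_cases hmod : PySem.Int.mod (PySem.Str.len k0) n_splits ≠ 0
    · rw [if_pos hmod, if_pos hmod]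
    · rw [if_neg hmod, if_neg hmod, PySem.List.foldl_append_singleton_eq_map,
        PySem.List.foldl_append_singleton_eq_map]
      simp only [List.nil_append]
      refine List.map_congr_left (fun n _ => ?_)
      rw [keys_fold_eq_items_fold _ _ _ (PySem.Dict.nodup_keys_ofList counts)]
      simp only [stepA_eq_insert]
      rw [show ((PySem.Dict.ofList counts).items.foldl (fun d p =>
            d.insert (PySem.Str.slice p.1 (some (n * PySem.Int.floordiv (PySem.Str.len k0) n_splits))
              (some ((n + 1) * PySem.Int.floordiv (PySem.Str.len k0) n_splits)))
              (d.getD (PySem.Str.slice p.1 (some (n * PySem.Int.floordiv (PySem.Str.len k0) n_splits))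
                (some ((n + 1) * PySem.Int.floordiv (PySem.Str.len k0) n_splits))) 0 + p.2)) PySem.Dict.empty)
          = (pvSlicePairs (PySem.Int.floordiv (PySem.Str.len k0) n_splits) n (PySem.Dict.ofList counts).items).foldl
              (fun d p => d.insert p.1 (d.getD p.1 0 + p.2)) PySem.Dict.empty
        from by rw [pvSlicePairs, List.foldl_map]]
      rw [items_fold_eq_groupby]
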